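-- pv_equiv track=rewrite | github.com/avav1818/Python-challenges | PythonPrinciples/tic_tac_toe.py | get_row_col
-- ===== SOURCE A (Python) =====
-- def get_row_col(string):
--     input_column = string[0]
--     input_row = string[1]
--
--
--     # Columns and rows with their associatead indexes as key value pairs
--     column_row_indexes = {
--         "A" : 0, "B" : 1, "C" : 2,
--         "1" : 0, "2" : 1, "3" : 2
--     }
--
--     for col_key, col_item in column_row_indexes.items():
--         for row_key, row_item in column_row_indexes.items():
--             # Check to see if keys match "input_column" and "input_row"
--             if (col_key == input_column) and (row_key == input_row):
--                 return (row_item, col_item)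
-- ===== SOURCE B (Python) =====
-- def get_row_col(string):
--     input_column = string[0]
--     input_row = string[1]
--     column_row_indexes = {
--         "A": 0, "B": 1, "C": 2,
--         "1": 0, "2": 1, "3": 2
--     }
--     if input_column in column_row_indexes and input_row in column_row_indexes:
--         return (column_row_indexes[input_row], column_row_indexes[input_column])
--     return None
-- ===== Notes on version B (the rewrite author's own statement) =====
-- stated objective: simpler
-- what changed: Replaced A's 36-iteration nested scan over the dict items (with early return on the first matching key pair) by two membership tests and two direct dict lookups, no loops at all.
import Mathlib
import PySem

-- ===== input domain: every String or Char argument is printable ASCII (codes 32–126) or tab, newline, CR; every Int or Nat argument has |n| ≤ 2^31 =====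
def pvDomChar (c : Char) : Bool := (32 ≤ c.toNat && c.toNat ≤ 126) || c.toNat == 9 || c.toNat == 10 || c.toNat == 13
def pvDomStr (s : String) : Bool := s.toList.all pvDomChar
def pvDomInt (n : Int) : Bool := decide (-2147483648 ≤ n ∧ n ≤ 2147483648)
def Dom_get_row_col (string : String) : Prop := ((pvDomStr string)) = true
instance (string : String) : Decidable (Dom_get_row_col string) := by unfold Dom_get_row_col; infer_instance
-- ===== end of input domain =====

-- B replaces A's nested dict-items scan with two membership tests and two direct lookups (simpler).

-- ===== PORT A =====
-- the dict's items, in insertion order (keys are one-character strings, ported as Char)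
def pvTable : List (Char × Int) :=
  [('A', 0), ('B', 1), ('C', 2), ('1', 0), ('2', 1), ('3', 2)]

-- A: string[0] / string[1] (IndexError → none, excluded by Pre_), then the nested
-- for-loops over .items() with early return, ported as nested findSome? (first match wins).
def get_row_col (string : String) : Option (Int × Int) :=
  match PySem.Str.pyGet? string 0, PySem.Str.pyGet? string 1 with
  | some input_column, some input_row =>
      pvTable.findSome? (fun ck =>
        pvTable.findSome? (fun rk =>
          if ck.1 = input_column ∧ rk.1 = input_row then some (rk.2, ck.2) else none))
  | _, _ => none

-- ===== PORT B =====
-- B's own dict (same literal the Python B declares), as an association list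
def pvIndexes : List (Char × Int) :=
  [('A', 0), ('B', 1), ('C', 2), ('1', 0), ('2', 1), ('3', 2)]

def get_row_col_alt (string : String) : Option (Int × Int) :=
  match PySem.Str.pyGet? string 0 with
  | none => none
  | some input_column =>
    match PySem.Str.pyGet? string 1 with
    | none => none
    | some input_row =>
      match pvIndexes.lookup input_row with
      | none => none
      | some ri =>
        match pvIndexes.lookup input_column with
        | none => none
        | some ci => some (ri, ci)

-- ===== PRECONDITION & SPEC =====
-- string[0] and string[1] raise IndexError on strings shorter than 2 characters
def Pre_get_row_col (string : String) : Prop := 2 ≤ string.toList.length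
instance (string : String) : Decidable (Pre_get_row_col string) := by unfold Pre_get_row_col; infer_instance
def pvWitness_get_row_col : String := "B2"

def Spec_get_row_col (string : String) (out : Option (Int × Int)) : Prop := out = get_row_col_alt string
instance (string : String) (out : Option (Int × Int)) : Decidable (Spec_get_row_col string out) := by unfold Spec_get_row_col; infer_instance

-- ===== CLAIM (what is proved, stated in full; the proofs are below) =====
def Claim_equal_get_row_col : Prop := ∀ (string : String), Dom_get_row_col string → Pre_get_row_col string → Spec_get_row_col string (get_row_col string)

-- ===== LEMMAS AND PROOFS =====

-- first-match scan for a single key equals List.lookup (generic in the wrapped result)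
theorem pv_findSome_lookup (g : Int → Int × Int) (r : Char) (l : List (Char × Int)) :
    l.findSome? (fun rk => if rk.1 = r then some (g rk.2) else none)
      = (l.lookup r).map g := by
  induction l with
  | nil => rfl
  | cons a t ih =>
      by_cases h : a.1 = r
      · simp [List.lookup, h]
      · have h' : (r == a.1) = false := beq_eq_false_iff_ne.2 (fun e => h e.symm)
        simp [List.lookup, h, h', ih]

-- the nested first-match scan over the table equals the two direct lookups
theorem pv_scan_eq_lookup (c r : Char) :
    pvTable.findSome? (fun ck =>
      pvTable.findSome? (fun rk =>
        if ck.1 = c ∧ rk.1 = r then some (rk.2, ck.2) else none))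
    = (match pvIndexes.lookup r with
       | none => none
       | some ri =>
         match pvIndexes.lookup c with
         | none => none
         | some ci => some (ri, ci) : Option (Int × Int)) := by
  have htab : pvTable = pvIndexes := rfl
  rw [htab]
  have hfun : (fun ck : Char × Int =>
      pvIndexes.findSome? (fun rk =>
        if ck.1 = c ∧ rk.1 = r then some (rk.2, ck.2) else none))
      = (fun ck : Char × Int =>
          if ck.1 = c then (pvIndexes.lookup r).map (fun ri => (ri, ck.2)) else none) := by
    funext ck
    by_cases h : ck.1 = c
    · simp only [h, true_and, if_true]
      exact pv_findSome_lookup (fun ri => (ri, ck.2)) r pvIndexes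
    · simp [h, pvIndexes, List.findSome?]
  rw [hfun]
  cases hlr : pvIndexes.lookup r with
  | none => simp [pvIndexes, List.findSome?]
  | some ri =>
      simp only [Option.map_some]
      have := pv_findSome_lookup (fun ci => (ri, ci)) c pvIndexes
      rw [this]
      cases pvIndexes.lookup c <;> rfl

-- ===== VERDICT (by name: the statement is the Claim_ definition above) =====
theorem get_row_col_spec : Claim_equal_get_row_col := by
  intro s _ _
  unfold Spec_get_row_col get_row_col get_row_col_alt
  cases h0 : PySem.Str.pyGet? s 0 <;> cases h1 : PySem.Str.pyGet? s 1 <;> simp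
  exact pv_scan_eq_lookup _ _
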